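-- pv_equiv track=rewrite | github.com/clld/clldutils | clldutils/text.py | iter_text
-- ===== SOURCE A (Python) =====
-- BRACKETS = {
--     "(": ")",
--     "{": "}",
--     "[": "]",
--     "（": "）",
--     "【": "】",
--     "『": "』",
--     "«": "»",
--     "⁽": "⁾",
--     "₍": "₎"
-- }
--
-- class TextType(object):
--     text = 1
--     open = 2
--     context = 3
--     close = 4
--
-- def _tokens(text, brackets=None):
--     brackets = brackets or BRACKETS
--     stack = []
--     for c in text:
--         if c in brackets:
--             stack.append(brackets[c])
--             yield c, TextType.open
--         elif stack and c == stack[-1]: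
--             stack.pop()
--             yield c, TextType.close
--         elif not stack:
--             yield c, TextType.text
--         else:
--             yield c, TextType.context
--
-- def iter_text(text, separators="/,;~", brackets=None):
--     word = []
--
--     for c, type_ in _tokens(text, brackets=brackets):
--         if type_ == TextType.text:
--             if c in separators:
--                 word = ''.join(word).strip()
--                 if word:
--                     yield word
--                 word = []
--             else:
--                 word.append(c)
--     word = ''.join(word).strip()
--     if word:
--         yield word
-- ===== SOURCE B (Python) =====
-- BRACKETS = {
--     "(": ")",
--     "{": "}",
--     "[": "]",
--     "（": "）",
--     "【": "】",
--     "『": "』",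
--     "«": "»",
--     "⁽": "⁾",
--     "₍": "₎"
-- }
--
--
-- def iter_text(text, separators="/,;~", brackets=None):
--     brackets = brackets or BRACKETS
--     # pass 1: collect the characters that sit at bracket depth 0 and are not openers
--     stack, kept = [], []
--     for c in text:
--         closer = brackets.get(c)
--         if closer is not None:
--             stack.append(closer)
--         elif stack:
--             if c == stack[-1]:
--                 stack.pop()
--         else:
--             kept.append(c)
--     # pass 2: cut the kept characters at every separator, keeping empty pieces
--     parts, cur = [], []
--     for c in kept:
--         if c in separators:
--             parts.append(''.join(cur))
--             cur = []
--         else: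
--             cur.append(c)
--     parts.append(''.join(cur))
--     # pass 3: strip each piece and yield the non-empty ones
--     for part in (p.strip() for p in parts):
--         if part:
--             yield part
-- ===== Notes on version B (the rewrite author's own statement) =====
-- stated objective: simpler
-- what changed: Replaced A's _tokens/TextType producer-consumer generator pair and its interleaved accumulate-and-emit loop with a staged build-then-split-then-filter pipeline: one pass keeps the depth-0 non-opener characters, a second pass cuts that character list at separators, and a final map/filter strips each piece and drops the empties.
import Mathlib
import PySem

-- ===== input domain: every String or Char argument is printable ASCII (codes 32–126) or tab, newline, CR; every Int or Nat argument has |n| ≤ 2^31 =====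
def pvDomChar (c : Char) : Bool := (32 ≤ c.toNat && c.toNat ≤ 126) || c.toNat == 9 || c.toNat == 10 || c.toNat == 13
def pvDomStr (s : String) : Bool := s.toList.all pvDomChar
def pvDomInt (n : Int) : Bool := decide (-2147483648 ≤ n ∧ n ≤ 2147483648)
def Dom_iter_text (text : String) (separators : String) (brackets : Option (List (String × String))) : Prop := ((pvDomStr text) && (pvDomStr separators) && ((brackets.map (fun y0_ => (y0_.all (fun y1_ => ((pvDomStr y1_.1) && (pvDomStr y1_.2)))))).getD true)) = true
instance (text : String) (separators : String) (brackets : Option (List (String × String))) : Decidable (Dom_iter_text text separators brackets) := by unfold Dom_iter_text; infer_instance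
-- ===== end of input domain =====

-- ===== PORT A =====
-- B replaces A's _tokens/TextType producer-consumer generator pair by a staged
-- build(fold)-then-split(fold)-then-filter pipeline (objective: simpler); equivalence is about
-- the RETURN values (both Pythons are generators, compared as the list of yielded strings).

-- the module-level BRACKETS dict
def pyBRACKETS : List (String × String) :=
  [("(", ")"), ("{", "}"), ("[", "]"), ("（", "）"), ("【", "】"),
   ("『", "』"), ("«", "»"), ("⁽", "⁾"), ("₍", "₎")]

-- `brackets = brackets or BRACKETS` (None and {} are both falsy)
def pvBracketDict (brackets : Option (List (String × String))) : PySem.Dict String String :=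
  match brackets with
  | none => PySem.Dict.mk pyBRACKETS
  | some l => if l = [] then PySem.Dict.mk pyBRACKETS else PySem.Dict.mk l

-- _tokens: TextType.text = 1, open = 2, context = 3, close = 4; stack top at the head
def pvTokens (br : PySem.Dict String String) : List Char → List String → List (Char × Nat)
  | [], _ => []
  | c :: rest, stack =>
    match br.get? (String.singleton c) with
    | some closer => (c, 2) :: pvTokens br rest (closer :: stack)
    | none =>
      match stack with
      | top :: stack' =>
        if String.singleton c = top then (c, 4) :: pvTokens br rest stack'
        else (c, 3) :: pvTokens br rest (top :: stack')
      | [] => (c, 1) :: pvTokens br rest []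

-- the consuming loop of iter_text, with the trailing flush
def pvIterLoop (seps : List Char) : List (Char × Nat) → List Char → List String
  | [], word =>
      let w := PySem.Str.strip (String.ofList word)
      if w = "" then [] else [w]
  | (c, t) :: rest, word =>
      if t = 1 then
        if c ∈ seps then
          let w := PySem.Str.strip (String.ofList word)
          (if w = "" then [] else [w]) ++ pvIterLoop seps rest []
        else pvIterLoop seps rest (word ++ [c])
      else pvIterLoop seps rest word

def iter_text (text : String) (separators : String) (brackets : Option (List (String × String))) : List String :=
  pvIterLoop separators.toList (pvTokens (pvBracketDict brackets) text.toList []) []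

-- ===== PORT B =====
-- pass-1 loop body: state = (stack, kept); the stack top is at the END, as Python's append/pop
def pvStep (br : PySem.Dict String String) (st : List String × List Char) (c : Char) : List String × List Char :=
  match br.get? (String.singleton c) with
  | some closer => (st.1 ++ [closer], st.2)
  | none =>
    match st.1.getLast? with
    | some top => if String.singleton c = top then (st.1.dropLast, st.2) else st
    | none => (st.1, st.2 ++ [c])

-- pass-2 loop body: state = (parts, cur)
def pvSplitStep (seps : List Char) (st : List String × List Char) (c : Char) : List String × List Char :=
  if c ∈ seps then (st.1 ++ [String.ofList st.2], []) else (st.1, st.2 ++ [c])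

def iter_text_alt (text : String) (separators : String) (brackets : Option (List (String × String))) : List String :=
  let kept := (text.toList.foldl (pvStep (pvBracketDict brackets)) ([], [])).2
  let st := kept.foldl (pvSplitStep separators.toList) ([], [])
  ((st.1 ++ [String.ofList st.2]).map PySem.Str.strip).filter (fun q => q ≠ "")

-- ===== PRECONDITION & SPEC =====
def Spec_iter_text (text : String) (separators : String) (brackets : Option (List (String × String))) (out : List String) : Prop := out = iter_text_alt text separators brackets
instance (text : String) (separators : String) (brackets : Option (List (String × String))) (out : List String) : Decidable (Spec_iter_text text separators brackets out) := by unfold Spec_iter_text; infer_instance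

-- ===== CLAIM (what is proved, stated in full; the proofs are below) =====
def Claim_equal_iter_text : Prop := ∀ (text : String) (separators : String) (brackets : Option (List (String × String))), Dom_iter_text text separators brackets → Spec_iter_text text separators brackets (iter_text text separators brackets)

-- ===== LEMMAS AND PROOFS =====

-- proof-side recursive characterisation of pass 1 (stack top at the HEAD here)
def pvKeptR (br : PySem.Dict String String) : List Char → List String → List Char
  | [], _ => []
  | c :: rest, stack =>
    match br.get? (String.singleton c) with
    | some closer => pvKeptR br rest (closer :: stack)
    | none =>
      match stack with
      | top :: stack' =>
        if String.singleton c = top then pvKeptR br rest stack'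
        else pvKeptR br rest (top :: stack')
      | [] => c :: pvKeptR br rest []

theorem pvStep_foldl (br : PySem.Dict String String) :
    ∀ (cs : List Char) (s : List String) (acc : List Char),
      (cs.foldl (pvStep br) (s.reverse, acc)).2 = acc ++ pvKeptR br cs s := by
  intro cs
  induction cs with
  | nil => intro s acc; simp [pvKeptR]
  | cons c rest ih =>
      intro s acc
      simp only [List.foldl_cons, pvStep, pvKeptR]
      cases hbr : br.get? (String.singleton c) with
      | some closer =>
          have h2 := ih (closer :: s) acc
          simp only [List.reverse_cons] at h2
          simpa using h2
      | none =>
          cases s with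
          | nil => simpa using ih [] (acc ++ [c])
          | cons top s' =>
              have hget : ((top :: s').reverse).getLast? = some top := by
                simp [List.reverse_cons]
              have hdrop : ((top :: s').reverse).dropLast = s'.reverse := by
                simp [List.reverse_cons]
              by_cases ht : String.singleton c = top
              · simpa [hget, hdrop, ht] using ih s' acc
              · simpa [hget, ht] using ih (top :: s') acc

-- parts already appended by pass 2 are a passive prefix of the foldl state
theorem pvSplitStep_prefix (seps : List Char) :
    ∀ (l : List Char) (done : List String) (cur : List Char),
      l.foldl (pvSplitStep seps) (done, cur)
        = (done ++ (l.foldl (pvSplitStep seps) ([], cur)).1, (l.foldl (pvSplitStep seps) ([], cur)).2) := by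
  intro l
  induction l with
  | nil => intro done cur; simp
  | cons c rest ih =>
      intro done cur
      simp only [List.foldl_cons, pvSplitStep]
      by_cases hc : c ∈ seps
      · simp only [hc, if_pos, List.nil_append]
        rw [ih (done ++ [String.ofList cur]) [], ih [String.ofList cur] []]
        simp
      · simp only [hc, if_neg, not_false_iff]
        exact ih done (cur ++ [c])

-- B's pass 2+3 applied to a kept-character list, with current word `word`
def pvFinish (seps : List Char) (kept word : List Char) : List String :=
  let st := kept.foldl (pvSplitStep seps) ([], word)
  ((st.1 ++ [String.ofList st.2]).map PySem.Str.strip).filter (fun q => q ≠ "")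

theorem pvMain (seps : List Char) (br : PySem.Dict String String) :
    ∀ (cs : List Char) (stack : List String) (word : List Char),
      pvIterLoop seps (pvTokens br cs stack) word = pvFinish seps (pvKeptR br cs stack) word := by
  intro cs
  induction cs with
  | nil =>
      intro stack word
      simp only [pvTokens, pvKeptR, pvIterLoop, pvFinish, List.foldl_nil]
      by_cases h : PySem.Str.strip (String.ofList word) = "" <;> simp [h]
  | cons c rest ih =>
      intro stack word
      simp only [pvTokens, pvKeptR]
      cases hbr : br.get? (String.singleton c) with
      | some closer => simpa [pvIterLoop] using ih (closer :: stack) word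
      | none =>
          cases stack with
          | nil =>
              simp only [pvIterLoop]
              by_cases hc : c ∈ seps
              · simp only [hc, if_pos]
                rw [ih [] []]
                simp only [pvFinish, List.foldl_cons, pvSplitStep, hc, if_pos, List.nil_append]
                rw [pvSplitStep_prefix seps (pvKeptR br rest []) [String.ofList word] []]
                by_cases h : PySem.Str.strip (String.ofList word) = "" <;> simp [h]
              · simp only [hc, if_neg, not_false_iff, if_true]
                rw [ih [] (word ++ [c])]
                simp [pvFinish, pvSplitStep, hc]
          | cons top stack' =>
              by_cases ht : String.singleton c = top
              · simpa [ht, pvIterLoop] using ih stack' word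
              · simpa [ht, pvIterLoop] using ih (top :: stack') word

-- ===== VERDICT (by name: the statement is the Claim_ definition above) =====
theorem iter_text_spec : Claim_equal_iter_text := by
  intro text separators brackets _
  unfold Spec_iter_text iter_text iter_text_alt
  rw [pvMain separators.toList (pvBracketDict brackets) text.toList [] []]
  have hk : (text.toList.foldl (pvStep (pvBracketDict brackets)) ([], [])).2
      = pvKeptR (pvBracketDict brackets) text.toList [] := by
    simpa using pvStep_foldl (pvBracketDict brackets) text.toList [] []
  rw [pvFinish, hk]
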